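-- pv_equiv track=rewrite | github.com/MrBrantCode/unitest_baseline | mut_generate/mist_train_cf/cf_79362/solution.py | pattern_counter
-- ===== SOURCE A (Python) =====
-- def pattern_counter(text):
--     # Initialize counter to 0
--     count = 0
--
--     # Check if the text is empty, if true return 0
--     if len(text) == 0:
--         return count
--
--     # Iterate over the string in steps for three, to handle overlapping strings
--     for i in range(0, len(text)-2, 3):
--         # Check for the pattern and increment counter if found
--         if text[i:i+3] == 'xyz':
--             count += 1
--     return count
-- ===== SOURCE B (Python) =====
-- def pattern_counter(text):
--     # Search for every occurrence of 'xyz' with str.find (including overlapping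
--     # ones) and count those that start at an index that is a multiple of 3.
--     count = 0
--     pos = text.find('xyz')
--     while pos != -1:
--         if pos % 3 == 0:
--             count += 1
--         pos = text.find('xyz', pos + 1)
--     return count
-- ===== Notes on version B (the rewrite author's own statement) =====
-- stated objective: faster
-- what changed: Replaces A's fixed-stride chunk scan (slice every 3 indices and compare in a Python-level loop) by repeated str.find substring search locating every occurrence of the pattern, counting only occurrences whose start index is divisible by 3.
import Mathlib
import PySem

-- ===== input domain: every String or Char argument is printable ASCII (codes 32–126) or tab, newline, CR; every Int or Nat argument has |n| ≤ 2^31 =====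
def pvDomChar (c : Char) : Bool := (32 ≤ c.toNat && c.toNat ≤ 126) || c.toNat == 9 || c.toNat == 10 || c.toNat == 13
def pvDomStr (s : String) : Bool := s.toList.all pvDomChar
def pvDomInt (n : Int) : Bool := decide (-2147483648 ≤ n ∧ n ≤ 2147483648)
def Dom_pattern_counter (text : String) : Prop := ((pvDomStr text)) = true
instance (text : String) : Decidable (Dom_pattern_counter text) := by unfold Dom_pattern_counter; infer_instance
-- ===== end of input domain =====

-- B replaces A's fixed-stride chunk scan by repeated str.find over all occurrences of the
-- pattern, counting those whose start index is a multiple of 3 (measured faster: C-level find).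

-- ===== PORT A =====
def pattern_counter (text : String) : Int :=
  let count : Int := 0
  if PySem.Str.len text = 0 then count
  else
    (PySem.List.pyRange 0 (PySem.Str.len text - 2) 3).foldl
      (fun count i =>
        if PySem.Str.slice text (some i) (some (i + 3)) = "xyz" then count + 1 else count)
      count

-- ===== PORT B =====
-- text.find('xyz', start) ported as a search on the suffix (text dropped past
-- start) returning the relative index of the first occurrence; none = Python's -1.
def pvFindXyz : List Char → Option Nat
  | a :: b :: c :: rest =>
      if (a, b, c) = ('x', 'y', 'z') then some 0
      else (pvFindXyz (b :: c :: rest)).map (· + 1)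
  | _ => none

-- the while loop, with structural fuel (length+1 steps always suffice);
-- pos = base + r is the absolute index of the occurrence found
def pvLoop : Nat -> List Char -> Nat -> Int -> Int
  | 0, _, _, count => count
  | fuel + 1, cs, base, count =>
      match pvFindXyz cs with
      | none => count
      | some r =>
          pvLoop fuel (cs.drop (r + 1)) (base + r + 1)
            (if (base + r) % 3 = 0 then count + 1 else count)

def pattern_counter_alt (text : String) : Int := pvLoop (text.toList.length + 1) text.toList 0 0

-- ===== PRECONDITION & SPEC =====
def Spec_pattern_counter (text : String) (out : Int) : Prop := out = pattern_counter_alt text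
instance (text : String) (out : Int) : Decidable (Spec_pattern_counter text out) := by unfold Spec_pattern_counter; infer_instance

-- ===== CLAIM (what is proved, stated in full; the proofs are below) =====
def Claim_equal_pattern_counter : Prop := ∀ (text : String), Dom_pattern_counter text → Spec_pattern_counter text (pattern_counter text)

-- ===== LEMMAS AND PROOFS =====

-- canonical chunk count: the value A computes
def pvCnt : List Char → Int
  | a :: b :: c :: rest => (if (a, b, c) = ('x', 'y', 'z') then pvCnt rest + 1 else pvCnt rest)
  | _ => 0

-- occurrences of xyz in cs at relative positions r with (m + r) % 3 = 0 (m = base % 3)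
def pvCntAt : List Char → Nat → Int
  | a :: b :: c :: rest, m =>
      (if (a, b, c) = ('x', 'y', 'z') ∧ m = 0 then 1 else 0) + pvCntAt (b :: c :: rest) ((m + 1) % 3)
  | _, _ => 0

theorem pvCntAt_shift (x : Char) (xs : List Char) (m : Nat) (hm : m ≠ 0) :
    pvCntAt (x :: xs) m = pvCntAt xs ((m + 1) % 3) := by
  match xs with
  | [] => simp [pvCntAt]
  | [b] => simp [pvCntAt]
  | b :: c :: t => simp [pvCntAt, hm]

theorem pvCntAt_zero (cs : List Char) : pvCntAt cs 0 = pvCnt cs := by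
  match cs with
  | [] => simp [pvCntAt, pvCnt]
  | [a] => simp [pvCntAt, pvCnt]
  | [a, b] => simp [pvCntAt, pvCnt]
  | a :: b :: c :: rest =>
      have h1 : pvCntAt (b :: c :: rest) 1 = pvCntAt (c :: rest) 2 := pvCntAt_shift _ _ 1 (by omega)
      have h2 : pvCntAt (c :: rest) 2 = pvCntAt rest 0 := pvCntAt_shift _ _ 2 (by omega)
      rw [show pvCntAt (a :: b :: c :: rest) 0
            = (if (a, b, c) = ('x', 'y', 'z') ∧ (0 : Nat) = 0 then 1 else 0)
              + pvCntAt (b :: c :: rest) 1 from rfl, h1, h2, pvCntAt_zero rest]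
      by_cases h : (a, b, c) = ('x', 'y', 'z') <;> simp [pvCnt, h] <;> ring

theorem pvCntAt_none (cs : List Char) (m : Nat) (h : pvFindXyz cs = none) :
    pvCntAt cs m = 0 := by
  match cs with
  | [] => simp [pvCntAt]
  | [a] => simp [pvCntAt]
  | [a, b] => simp [pvCntAt]
  | a :: b :: c :: rest =>
      unfold pvFindXyz at h
      by_cases hx : (a, b, c) = ('x', 'y', 'z')
      · simp [hx] at h
      · simp only [hx, if_false, Option.map_eq_none_iff] at h
        simp [pvCntAt, hx, pvCntAt_none (b :: c :: rest) _ h]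

theorem pvCntAt_some (r : Nat) (cs : List Char) (m : Nat) (hm : m < 3)
    (h : pvFindXyz cs = some r) :
    pvCntAt cs m
      = (if (m + r) % 3 = 0 then 1 else 0) + pvCntAt (cs.drop (r + 1)) ((m + r + 1) % 3) := by
  match cs with
  | [] => simp [pvFindXyz] at h
  | [a] => simp [pvFindXyz] at h
  | [a, b] => simp [pvFindXyz] at h
  | a :: b :: c :: rest =>
      unfold pvFindXyz at h
      by_cases hx : (a, b, c) = ('x', 'y', 'z')
      · simp only [hx, if_true, Option.some.injEq] at h
        subst h
        show (if (a, b, c) = ('x', 'y', 'z') ∧ m = 0 then 1 else 0)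
              + pvCntAt (b :: c :: rest) ((m + 1) % 3)
            = _
        simp only [hx, true_and, List.drop_succ_cons, List.drop_zero, Nat.add_zero,
          Nat.mod_eq_of_lt hm]
      · simp only [hx, if_false, Option.map_eq_some_iff] at h
        obtain ⟨r', hr', hr1⟩ := h
        subst hr1
        have ih := pvCntAt_some r' (b :: c :: rest) ((m + 1) % 3) (by omega) hr'
        show (if (a, b, c) = ('x', 'y', 'z') ∧ m = 0 then 1 else 0)
              + pvCntAt (b :: c :: rest) ((m + 1) % 3) = _
        have e1 : ((m + 1) % 3 + r') % 3 = (m + (r' + 1)) % 3 := by omega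
        have e2 : ((m + 1) % 3 + r' + 1) % 3 = (m + (r' + 1) + 1) % 3 := by omega
        rw [ih]
        simp only [hx, false_and, if_false, zero_add, List.drop_succ_cons, e1, e2]

theorem pvFindXyz_some_pos {cs : List Char} {r : Nat} (h : pvFindXyz cs = some r) :
    0 < cs.length := by
  cases cs with
  | nil => simp [pvFindXyz] at h
  | cons a t => simp

theorem pvLoop_eq (fuel : Nat) (cs : List Char) (base : Nat) (count : Int)
    (hf : cs.length < fuel) :
    pvLoop fuel cs base count = count + pvCntAt cs (base % 3) := by
  match fuel with
  | 0 => omega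
  | fuel + 1 =>
      unfold pvLoop
      split
      · next h => rw [pvCntAt_none cs _ h]; ring
      · next r h =>
          have hpos := pvFindXyz_some_pos h
          rw [pvLoop_eq fuel (cs.drop (r + 1)) (base + r + 1) _
              (by simp [List.length_drop]; omega)]
          rw [pvCntAt_some r cs (base % 3) (by omega) h]
          have h1 : (base % 3 + r) % 3 = (base + r) % 3 := by omega
          have h2 : (base % 3 + r + 1) % 3 = (base + r + 1) % 3 := by omega
          simp only [h1, h2]
          split <;> ring

-- ===== A-side: A's fold equals the chunk count =====
theorem pv_fold_eq (cs : List Char) (k : Int) :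
    (List.range (cs.length / 3)).foldl
      (fun acc j => if (cs.drop (3 * j)).take 3 = ['x', 'y', 'z'] then acc + 1 else acc) k
      = k + pvCnt cs := by
  match cs with
  | a :: b :: c :: rest =>
      have hlen : (a :: b :: c :: rest).length / 3 = rest.length / 3 + 1 := by
        simp [List.length_cons]; omega
      rw [hlen, List.range_succ_eq_map, List.foldl_cons, List.foldl_map]
      have hd : ∀ j : Nat, List.drop (3 * (j + 1)) (a :: b :: c :: rest) = List.drop (3 * j) rest := by
        intro j
        have h3 : 3 * (j + 1) = 3 * j + 1 + 1 + 1 := by omega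
        simp [h3, List.drop_succ_cons]
      simp only [Nat.succ_eq_add_one, hd, Nat.mul_zero, List.drop_zero,
        List.take_succ_cons, List.take_zero]
      rw [pv_fold_eq rest]
      simp only [pvCnt]
      by_cases h : a = 'x' ∧ b = 'y' ∧ c = 'z'
      · obtain ⟨h1, h2, h3⟩ := h; subst h1; subst h2; subst h3; simp; ring
      · have h1 : ¬ ([a, b, c] = ['x', 'y', 'z']) := by simpa using h
        have h2 : ¬ ((a, b, c) = ('x', 'y', 'z')) := by simpa using h
        rw [if_neg h1, if_neg h2]
  | [] => simp [pvCnt]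
  | [a] => simp [pvCnt]
  | [a, b] => simp [pvCnt]

theorem pv_slice_chunk (cs : List Char) (j : Nat) :
    PySem.List.slice cs (some ((3 : Int) * j)) (some ((3 : Int) * j + 3)) =
      (cs.drop (3 * j)).take 3 := by
  rw [PySem.List.slice_toNat cs (by positivity) (by positivity)]
  have h1 : ((3 : Int) * j + 3).toNat - ((3 : Int) * j).toNat = 3 := by omega
  have h2 : ((3 : Int) * j).toNat = 3 * j := by omega
  rw [h1, h2]

theorem pv_main (text : String) : pattern_counter text = pattern_counter_alt text := by
  unfold pattern_counter pattern_counter_alt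
  rw [pvLoop_eq _ _ _ _ (by omega), pvCntAt_zero, Int.zero_add]
  have hlen : PySem.Str.len text = (text.toList.length : Int) := by
    simp [PySem.Str.len_eq]
  by_cases h0 : PySem.Str.len text = 0
  · rw [if_pos h0]
    have : text.toList = [] := by
      rw [hlen] at h0
      exact List.eq_nil_of_length_eq_zero (by exact_mod_cast h0)
    simp [this, pvCnt]
  · rw [if_neg h0]
    rw [PySem.List.pyRange_of_pos _ _ (by norm_num), List.foldl_map]
    have hcard : (if (0 : Int) < PySem.Str.len text - 2
        then ((PySem.Str.len text - 2 - 0 + 3 - 1) / 3).toNat else 0)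
        = text.toList.length / 3 := by
      rw [hlen]; split_ifs with h
      · omega
      · omega
    rw [hcard]
    rw [PySem.List.foldl_congr_mem _ _
      (fun acc j => if (text.toList.drop (3 * j)).take 3 = ['x', 'y', 'z'] then acc + 1 else acc) _
      (by
        intro acc j _
        have heq : (PySem.Str.slice text (some (0 + 3 * (j : Int))) (some (0 + 3 * (j : Int) + 3)) = "xyz")
            ↔ ((text.toList.drop (3 * j)).take 3 = ['x', 'y', 'z']) := by
          rw [String.ext_iff, PySem.Str.toList_slice, zero_add,
              show PySem.Chars.slice text.toList (some ((3 : Int) * j)) (some ((3 : Int) * j + 3))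
                = (text.toList.drop (3 * j)).take 3 from pv_slice_chunk text.toList j,
              show "xyz".toList = ['x', 'y', 'z'] from rfl]
        simp only [heq])]
    rw [pv_fold_eq]
    ring

-- ===== VERDICT (by name: the statement is the Claim_ definition above) =====
theorem pattern_counter_spec : Claim_equal_pattern_counter := by
  intro text _
  unfold Spec_pattern_counter
  exact pv_main text
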